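-- pv_equiv track=rewrite | github.com/RMCV-Rajapaksha/Competitive-Programing-New | Haxtream 2024/Painting Challenge.py | max_paint_cost
-- ===== SOURCE A (Python) =====
-- def max_paint_cost(P, Q, final_colors):
--     # Array to store how many times each cell has been painted
--     paint_count = [0] * P
--
--     # Keep track of whether we've processed this color
--     current_colors = final_colors[:]
--
--     # Process each contestant's color from 1 to Q
--     for color in range(1, Q + 1):
--         start = -1
--         # Find the largest contiguous subarray that could have been painted with this color
--         for i in range(P):
--             if current_colors[i] == color:
--                 if start == -1:
--                     start = i
--             else:
--                 if start != -1:
--                     # We've found a segment, mark all cells as painted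
--                     for j in range(start, i):
--                         paint_count[j] += 1
--                     start = -1
--         if start != -1:
--             # Handle the case when the segment goes till the end
--             for j in range(start, P):
--                 paint_count[j] += 1
--
--     # The result is the maximum paint count of any cell
--     return max(paint_count)
-- ===== SOURCE B (Python) =====
-- def max_paint_cost(P, Q, final_colors):
--     # Each cell is painted exactly once, for its own color, iff that color is in [1, Q].
--     return 1 if any(1 <= c <= Q for c in final_colors[:P]) else 0
-- ===== Notes on version B (the rewrite author's own statement) =====
-- stated objective: faster
-- what changed: Replaced the per-color segment scan (for every color 1..Q rescan all P cells and increment segment counters) by the observation that each cell is painted exactly once iff its own color lies in [1,Q], so one O(P) any-pass over the first P colors suffices.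
import Mathlib
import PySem

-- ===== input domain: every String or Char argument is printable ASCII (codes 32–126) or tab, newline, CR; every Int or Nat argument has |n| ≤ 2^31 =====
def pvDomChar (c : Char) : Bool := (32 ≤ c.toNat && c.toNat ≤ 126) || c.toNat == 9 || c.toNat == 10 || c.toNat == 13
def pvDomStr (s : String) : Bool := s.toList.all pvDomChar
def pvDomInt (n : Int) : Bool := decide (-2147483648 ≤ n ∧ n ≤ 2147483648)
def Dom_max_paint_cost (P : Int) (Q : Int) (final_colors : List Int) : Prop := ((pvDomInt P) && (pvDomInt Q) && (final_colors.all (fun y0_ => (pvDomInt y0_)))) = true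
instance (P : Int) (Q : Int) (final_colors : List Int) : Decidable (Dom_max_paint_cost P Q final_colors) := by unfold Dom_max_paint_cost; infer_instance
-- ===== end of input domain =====

-- B replaces A's O(Q*P) per-color segment rescans by one O(P) pass: a cell is painted once iff its own color is in [1,Q].

-- ===== PORT A =====
-- for j in range(s, e): paint_count[j] += 1
def pvPaintRange (pc : List Int) (s e : Int) : List Int :=
  (PySem.List.pyRange s e 1).foldl
    (fun acc j => acc.set j.toNat (PySem.List.pyGetD acc j 0 + 1)) pc

-- one iteration of the inner 'for i in range(P)' loop; state = (paint_count, start)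
def pvInnerStep (colors : List Int) (color : Int) (st : List Int × Int) (i : Int) : List Int × Int :=
  if PySem.List.pyGetD colors i 0 = color then
    (if st.2 = -1 then (st.1, i) else st)
  else
    (if st.2 ≠ -1 then (pvPaintRange st.1 st.2 i, -1) else st)

-- body of the outer 'for color in range(1, Q+1)' loop
def pvColorPass (P : Int) (colors : List Int) (pc : List Int) (color : Int) : List Int :=
  let st := (PySem.List.pyRange 0 P 1).foldl (pvInnerStep colors color) (pc, -1)
  if st.2 ≠ -1 then pvPaintRange st.1 st.2 P else st.1

def max_paint_cost (P : Int) (Q : Int) (final_colors : List Int) : Int :=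
  let paint_count := List.replicate P.toNat (0 : Int)
  let pc := (PySem.List.pyRange 1 (Q + 1) 1).foldl (pvColorPass P final_colors) paint_count
  (PySem.List.max? pc (fun x => x)).getD 0   -- max(paint_count); Pre_ guarantees pc ≠ []

-- ===== PORT B =====
def max_paint_cost_alt (P : Int) (Q : Int) (final_colors : List Int) : Int :=
  if (PySem.List.slice final_colors none (some P)).any (fun c => decide (1 ≤ c ∧ c ≤ Q)) then 1 else 0

-- ===== PRECONDITION & SPEC =====
-- Pre_ excludes exactly the inputs where A raises: P < 1 (max of empty list, ValueError) and
-- Q ≥ 1 with fewer than P colors (IndexError reading current_colors[i]).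
def Pre_max_paint_cost (P : Int) (Q : Int) (final_colors : List Int) : Prop :=
  1 ≤ P ∧ (Q < 1 ∨ P ≤ (final_colors.length : Int))
instance (P : Int) (Q : Int) (final_colors : List Int) : Decidable (Pre_max_paint_cost P Q final_colors) := by unfold Pre_max_paint_cost; infer_instance

def pvWitness_max_paint_cost : Int × Int × List Int := (2, 2, [1, 3])

def Spec_max_paint_cost (P : Int) (Q : Int) (final_colors : List Int) (out : Int) : Prop := out = max_paint_cost_alt P Q final_colors
instance (P : Int) (Q : Int) (final_colors : List Int) (out : Int) : Decidable (Spec_max_paint_cost P Q final_colors out) := by unfold Spec_max_paint_cost; infer_instance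

-- ===== CLAIM (what is proved, stated in full; the proofs are below) =====
def Claim_equal_max_paint_cost : Prop := ∀ (P : Int) (Q : Int) (final_colors : List Int), Dom_max_paint_cost P Q final_colors → Pre_max_paint_cost P Q final_colors → Spec_max_paint_cost P Q final_colors (max_paint_cost P Q final_colors)

-- ===== LEMMAS AND PROOFS =====

lemma pvFoldSet_length (l : List Int) (pc : List Int) :
    (l.foldl (fun acc j => acc.set j.toNat (PySem.List.pyGetD acc j 0 + 1)) pc).length = pc.length := by
  induction l generalizing pc with
  | nil => rfl
  | cons x t ih => simp [List.foldl, ih]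

lemma pvPaintRange_length (pc : List Int) (s e : Int) : (pvPaintRange pc s e).length = pc.length :=
  pvFoldSet_length _ pc

lemma pvPaintRange_getD (s e : Int) (hs : 0 ≤ s) : ∀ (pc : List Int) (j : Nat), j < pc.length →
    (pvPaintRange pc s e).getD j 0 =
      pc.getD j 0 + (if s ≤ (j : Int) ∧ (j : Int) < e then 1 else 0) := by
  by_cases he : e ≤ s
  · intro pc j hj
    unfold pvPaintRange
    rw [PySem.List.pyRange_one_eq_nil he]
    simp only [List.foldl_nil]
    have : ¬ (s ≤ (j : Int) ∧ (j : Int) < e) := by omega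
    simp [this]
  · push_neg at he
    have hrec := pvPaintRange_getD (s + 1) e (show (0:Int) ≤ s + 1 by omega)
    intro pc j hj
    unfold pvPaintRange
    rw [PySem.List.pyRange_one_cons he]
    simp only [List.foldl_cons]
    have hstep : (pc.set s.toNat (PySem.List.pyGetD pc s 0 + 1)).length = pc.length := by simp
    have h2 : (PySem.List.pyRange (s+1) e 1).foldl
        (fun acc j => acc.set j.toNat (PySem.List.pyGetD acc j 0 + 1))
        (pc.set s.toNat (PySem.List.pyGetD pc s 0 + 1)) =
        pvPaintRange (pc.set s.toNat (PySem.List.pyGetD pc s 0 + 1)) (s+1) e := rfl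
    rw [h2, hrec _ j (by omega)]
    by_cases hjs : (j : Int) = s
    · have hjs' : j = s.toNat := by omega
      subst hjs'
      have h1 : ¬ (s + 1 ≤ ((s.toNat : Nat) : Int) ∧ ((s.toNat : Nat) : Int) < e) := by omega
      have h3 : s ≤ ((s.toNat : Nat) : Int) ∧ ((s.toNat : Nat) : Int) < e := by omega
      rw [if_neg h1, if_pos h3, add_zero]
      rw [List.getD_eq_getElem _ _ (show s.toNat < (pc.set s.toNat (PySem.List.pyGetD pc s 0 + 1)).length by simpa using hj),
          List.getElem_set_self,
          PySem.List.pyGetD_eq_getElem pc 0 hs (by omega),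
          List.getD_eq_getElem _ _ hj]
    · have hne : s.toNat ≠ j := by omega
      have e3 : (pc.set s.toNat (PySem.List.pyGetD pc s 0 + 1)).getD j 0 = pc.getD j 0 := by
        rw [List.getD_eq_getElem _ _ (show j < (pc.set s.toNat (PySem.List.pyGetD pc s 0 + 1)).length by simpa using hj),
            List.getElem_set_ne hne, List.getD_eq_getElem _ _ hj]
      rw [e3]
      have hiff : (s + 1 ≤ (j : Int) ∧ (j : Int) < e) ↔ (s ≤ (j : Int) ∧ (j : Int) < e) := by omega
      rw [if_congr hiff rfl rfl]
termination_by (e - s).toNat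
decreasing_by omega

-- proof helper: the rest of the inner loop (from index i on) followed by the trailing paint
def pvInnerRest (colors : List Int) (c P i : Int) (pc : List Int) (start : Int) : List Int :=
  let st := (PySem.List.pyRange i P 1).foldl (pvInnerStep colors c) (pc, start)
  if st.2 ≠ -1 then pvPaintRange st.1 st.2 P else st.1

lemma pvInnerRest_step (colors : List Int) (c P i : Int) (pc : List Int) (start : Int)
    (hiP : i < P) :
    pvInnerRest colors c P i pc start =
      pvInnerRest colors c P (i + 1) (pvInnerStep colors c (pc, start) i).1
        (pvInnerStep colors c (pc, start) i).2 := by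
  unfold pvInnerRest
  rw [PySem.List.pyRange_one_cons hiP]
  rfl

lemma pvInner_spec (colors : List Int) (c P : Int) :
    ∀ (n : Nat) (i : Int) (pc : List Int) (start base : Int), i = P - (n : Int) → 0 ≤ i →
    ((start = -1 ∧ base = i) ∨ (0 ≤ start ∧ start < i ∧ base = start ∧
        ∀ k : Int, start ≤ k → k < i → PySem.List.pyGetD colors k 0 = c)) →
    (pvInnerRest colors c P i pc start).length = pc.length ∧ ∀ j : Nat, j < pc.length →
      (pvInnerRest colors c P i pc start).getD j 0 = pc.getD j 0 +
        (if base ≤ (j : Int) ∧ (j : Int) < P ∧ PySem.List.pyGetD colors (j : Int) 0 = c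
         then 1 else 0) := by
  intro n
  induction n with
  | zero =>
    intro i pc start base hi hi0 hinv
    have hiP : i = P := by omega
    unfold pvInnerRest
    rw [PySem.List.pyRange_one_eq_nil (by omega : P ≤ i)]
    simp only [List.foldl_nil]
    rcases hinv with ⟨h1, hb⟩ | ⟨h0, hlt, hb, hall⟩
    · subst h1
      rw [if_neg (by simp : ¬ ((pc, (-1 : Int)).2 ≠ -1))]
      refine ⟨rfl, fun j hj => ?_⟩
      have hc : ¬ (base ≤ (j : Int) ∧ (j : Int) < P ∧ PySem.List.pyGetD colors (j : Int) 0 = c) := by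
        rintro ⟨a, b, _⟩; omega
      rw [if_neg hc, add_zero]
    · have hne : start ≠ -1 := by omega
      rw [if_pos (by simpa using hne : (pc, start).2 ≠ -1)]
      refine ⟨pvPaintRange_length _ _ _, fun j hj => ?_⟩
      rw [pvPaintRange_getD start P h0 pc j hj, hb]
      by_cases hseg : start ≤ (j : Int) ∧ (j : Int) < P
      · rw [if_pos hseg, if_pos ⟨hseg.1, hseg.2, hall j hseg.1 (by omega)⟩]
      · have hc : ¬ (start ≤ (j : Int) ∧ (j : Int) < P ∧ PySem.List.pyGetD colors (j : Int) 0 = c) := by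
          rintro ⟨a, b, _⟩; exact hseg ⟨a, b⟩
        rw [if_neg hseg, if_neg hc]
  | succ n ih =>
    intro i pc start base hi hi0 hinv
    have hiP : i < P := by omega
    rw [pvInnerRest_step colors c P i pc start hiP]
    by_cases hcol : PySem.List.pyGetD colors i 0 = c
    · rcases hinv with ⟨h1, hb⟩ | ⟨h0, hlt, hb, hall⟩
      · -- start = -1, colors[i] = c: start := i
        subst h1
        have hstep : pvInnerStep colors c (pc, -1) i = (pc, i) := by
          simp [pvInnerStep, hcol]
        rw [hstep, hb]
        exact ih (i + 1) pc i i (by omega) (by omega)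
          (Or.inr ⟨hi0, by omega, rfl, fun k hk1 hk2 => by
            have hk : k = i := by omega
            rw [hk]; exact hcol⟩)
      · -- start ≥ 0, colors[i] = c: state unchanged
        have hne : start ≠ -1 := by omega
        have hstep : pvInnerStep colors c (pc, start) i = (pc, start) := by
          simp [pvInnerStep, hcol, hne]
        rw [hstep, hb]
        exact ih (i + 1) pc start start (by omega) (by omega)
          (Or.inr ⟨h0, by omega, rfl, fun k hk1 hk2 => by
            by_cases hk : k < i
            · exact hall k hk1 hk
            · have hk' : k = i := by omega
              rw [hk']; exact hcol⟩)
    · rcases hinv with ⟨h1, hb⟩ | ⟨h0, hlt, hb, hall⟩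
      · -- start = -1, colors[i] ≠ c: nothing happens
        subst h1
        have hstep : pvInnerStep colors c (pc, -1) i = (pc, -1) := by
          simp [pvInnerStep, hcol]
        rw [hstep, hb]
        rcases ih (i + 1) pc (-1) (i + 1) (by omega) (by omega) (Or.inl ⟨rfl, rfl⟩) with ⟨hl, hp⟩
        refine ⟨hl, fun j hj => ?_⟩
        rw [hp j hj]
        have hiff : (i + 1 ≤ (j : Int) ∧ (j : Int) < P ∧ PySem.List.pyGetD colors (j : Int) 0 = c) ↔
            (i ≤ (j : Int) ∧ (j : Int) < P ∧ PySem.List.pyGetD colors (j : Int) 0 = c) := by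
          constructor
          · rintro ⟨a, b, d⟩; exact ⟨by omega, b, d⟩
          · rintro ⟨a, b, d⟩
            refine ⟨?_, b, d⟩
            by_cases hji : (j : Int) = i
            · exact absurd (hji ▸ d) hcol
            · omega
        rw [if_congr hiff rfl rfl]
      · -- start ≥ 0, colors[i] ≠ c: paint [start, i), reset start
        have hne : start ≠ -1 := by omega
        have hstep : pvInnerStep colors c (pc, start) i = (pvPaintRange pc start i, -1) := by
          simp [pvInnerStep, hcol, hne]
        rw [hstep, hb]
        rcases ih (i + 1) (pvPaintRange pc start i) (-1) (i + 1) (by omega) (by omega)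
          (Or.inl ⟨rfl, rfl⟩) with ⟨hl, hp⟩
        rw [pvPaintRange_length] at hl
        refine ⟨hl, fun j hj => ?_⟩
        rw [hp j (by rw [pvPaintRange_length]; exact hj), pvPaintRange_getD start i h0 pc j hj]
        by_cases hseg : start ≤ (j : Int) ∧ (j : Int) < i
        · have hcj := hall j hseg.1 hseg.2
          have h1 : ¬ (i + 1 ≤ (j : Int) ∧ (j : Int) < P ∧ PySem.List.pyGetD colors (j : Int) 0 = c) := by
            rintro ⟨a, _, _⟩; omega
          rw [if_pos hseg, if_neg h1, if_pos ⟨hseg.1, by omega, hcj⟩, add_zero]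
        · rw [if_neg hseg, add_zero]
          by_cases h3 : i + 1 ≤ (j : Int) ∧ (j : Int) < P ∧ PySem.List.pyGetD colors (j : Int) 0 = c
          · rw [if_pos h3, if_pos ⟨by omega, h3.2⟩]
          · have h4 : ¬ (start ≤ (j : Int) ∧ (j : Int) < P ∧ PySem.List.pyGetD colors (j : Int) 0 = c) := by
              rintro ⟨a, b, d⟩
              refine h3 ⟨?_, b, d⟩
              by_cases hji : (j : Int) = i
              · exact absurd (hji ▸ d) hcol
              · omega
            rw [if_neg h3, if_neg h4]

lemma pvColorPass_spec (P : Int) (colors : List Int) (pc : List Int) (c : Int) (hP : 0 ≤ P) :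
    (pvColorPass P colors pc c).length = pc.length ∧ ∀ j : Nat, j < pc.length →
      (pvColorPass P colors pc c).getD j 0 = pc.getD j 0 +
        (if (j : Int) < P ∧ PySem.List.pyGetD colors (j : Int) 0 = c then 1 else 0) := by
  have hcp : pvColorPass P colors pc c = pvInnerRest colors c P 0 pc (-1) := rfl
  rw [hcp]
  rcases pvInner_spec colors c P P.toNat 0 pc (-1) 0 (by omega) (by omega)
    (Or.inl ⟨rfl, rfl⟩) with ⟨hl, hp⟩
  refine ⟨hl, fun j hj => ?_⟩
  rw [hp j hj]
  have : ((0 : Int) ≤ (j : Int) ∧ (j : Int) < P ∧ PySem.List.pyGetD colors (j : Int) 0 = c) ↔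
         ((j : Int) < P ∧ PySem.List.pyGetD colors (j : Int) 0 = c) := by
    constructor
    · rintro ⟨_, b, d⟩; exact ⟨b, d⟩
    · rintro ⟨b, d⟩; exact ⟨by omega, b, d⟩
  rw [if_congr this rfl rfl]

lemma pvOuter_spec (P : Int) (colors : List Int) (hP : 0 ≤ P) :
    ∀ (cs : List Int) (pc : List Int),
      (cs.foldl (pvColorPass P colors) pc).length = pc.length ∧ ∀ j : Nat, j < pc.length →
        (cs.foldl (pvColorPass P colors) pc).getD j 0 = pc.getD j 0 +
          (if (j : Int) < P then (cs.count (PySem.List.pyGetD colors (j : Int) 0) : Int) else 0) := by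
  intro cs
  induction cs with
  | nil => intro pc; simp
  | cons c t ih =>
    intro pc
    simp only [List.foldl_cons]
    rcases pvColorPass_spec P colors pc c hP with ⟨hl, hp⟩
    rcases ih (pvColorPass P colors pc c) with ⟨hl2, hp2⟩
    refine ⟨by rw [hl2, hl], fun j hj => ?_⟩
    rw [hp2 j (by rw [hl]; exact hj), hp j hj]
    have hcnt : ((c :: t).count (PySem.List.pyGetD colors (j : Int) 0) : Int) =
        (t.count (PySem.List.pyGetD colors (j : Int) 0) : Int) +
        (if PySem.List.pyGetD colors (j : Int) 0 = c then 1 else 0) := by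
      rw [List.count_cons]
      push_cast
      exact congrArg _ (if_congr (Iff.trans beq_iff_eq eq_comm) rfl rfl)
    by_cases hjP : (j : Int) < P
    · rw [if_pos hjP, if_pos hjP, hcnt]
      by_cases h : PySem.List.pyGetD colors (j : Int) 0 = c
      · rw [if_pos (⟨hjP, h⟩ : (j : Int) < P ∧ PySem.List.pyGetD colors (j : Int) 0 = c),
            if_pos h]
        ring
      · rw [if_neg (fun hh => h hh.2), if_neg h]
        ring
    · rw [if_neg hjP, if_neg hjP,
          if_neg (fun hh => hjP hh.1 : ¬ ((j : Int) < P ∧ PySem.List.pyGetD colors (j : Int) 0 = c)),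
          add_zero, add_zero]

lemma pvFoldlMax01 : ∀ (t : List Int) (x : Int), (x = 0 ∨ x = 1) → (∀ y ∈ t, y = 0 ∨ y = 1) →
    t.foldl max x = if x = 1 ∨ 1 ∈ t then 1 else 0 := by
  intro t
  induction t with
  | nil =>
    intro x hx _
    rcases hx with h | h <;> simp [h]
  | cons h t ih =>
    intro x hx hall
    simp only [List.foldl_cons]
    have hh := hall h (List.mem_cons_self)
    have := ih (max x h) (by rcases hx with a | a <;> rcases hh with b | b <;> simp [a, b])
      (fun y hy => hall y (List.mem_cons_of_mem _ hy))
    rw [this]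
    have : (max x h = 1 ∨ 1 ∈ t) ↔ (x = 1 ∨ 1 ∈ h :: t) := by
      rcases hx with a | a <;> rcases hh with b | b <;>
        simp [a, b, List.mem_cons]
    rw [if_congr this rfl rfl]

-- the fully-painted board: cell j holds 1 iff its own color is in [1, Q]
lemma pvFinal_getD (P Q : Int) (colors : List Int) (hP : 0 ≤ P) (j : Nat)
    (hj : j < P.toNat) :
    ((PySem.List.pyRange 1 (Q + 1) 1).foldl (pvColorPass P colors)
        (List.replicate P.toNat (0 : Int))).getD j 0 =
      (if 1 ≤ PySem.List.pyGetD colors (j : Int) 0 ∧ PySem.List.pyGetD colors (j : Int) 0 ≤ Q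
       then 1 else 0) := by
  rcases pvOuter_spec P colors hP (PySem.List.pyRange 1 (Q + 1) 1)
      (List.replicate P.toNat (0 : Int)) with ⟨-, hp⟩
  rw [hp j (by simpa using hj)]
  have hjP : (j : Int) < P := by omega
  rw [List.getD_eq_getElem _ _ (by simpa using hj)]
  simp only [List.getElem_replicate, if_pos hjP, zero_add]
  set v := PySem.List.pyGetD colors (j : Int) 0 with hv
  by_cases hmem : v ∈ PySem.List.pyRange 1 (Q + 1) 1
  · rw [List.count_eq_one_of_mem (PySem.List.nodup_pyRange_one 1 (Q + 1)) hmem]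
    rw [PySem.List.mem_pyRange_one] at hmem
    simp [show 1 ≤ v ∧ v ≤ Q by omega]
  · rw [List.count_eq_zero_of_not_mem hmem]
    rw [PySem.List.mem_pyRange_one] at hmem
    push_neg at hmem
    have : ¬ (1 ≤ v ∧ v ≤ Q) := by
      rintro ⟨a, b⟩; have := hmem a; omega
    simp [this]

-- ===== VERDICT (by name: the statement is the Claim_ definition above) =====
theorem max_paint_cost_spec : Claim_equal_max_paint_cost := by
  intro P Q colors _ hpre
  rcases hpre with ⟨hP1, hQlen⟩
  unfold Spec_max_paint_cost
  have hP0 : 0 ≤ P := by omega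
  have hgoal : max_paint_cost P Q colors =
      (PySem.List.max? ((PySem.List.pyRange 1 (Q + 1) 1).foldl (pvColorPass P colors)
        (List.replicate P.toNat (0 : Int))) (fun x => x)).getD 0 := rfl
  rw [hgoal]
  unfold max_paint_cost_alt
  set pc := (PySem.List.pyRange 1 (Q + 1) 1).foldl (pvColorPass P colors)
      (List.replicate P.toNat (0 : Int)) with hpc
  have hlen : pc.length = P.toNat := by
    rcases pvOuter_spec P colors hP0 (PySem.List.pyRange 1 (Q + 1) 1)
        (List.replicate P.toNat (0 : Int)) with ⟨hl, -⟩
    simpa using hl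
  have hall : ∀ y ∈ pc, y = 0 ∨ y = 1 := by
    intro y hy
    rcases List.mem_iff_getElem.mp hy with ⟨j, hj, hje⟩
    have := pvFinal_getD P Q colors hP0 j (by omega)
    rw [← hpc, List.getD_eq_getElem _ _ hj, hje] at this
    split_ifs at this <;> omega
  have hone : (1 : Int) ∈ pc ↔ ∃ j : Nat, j < P.toNat ∧
      1 ≤ PySem.List.pyGetD colors (j : Int) 0 ∧ PySem.List.pyGetD colors (j : Int) 0 ≤ Q := by
    constructor
    · intro hy
      rcases List.mem_iff_getElem.mp hy with ⟨j, hj, hje⟩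
      have := pvFinal_getD P Q colors hP0 j (by omega)
      rw [← hpc, List.getD_eq_getElem _ _ hj, hje] at this
      split_ifs at this with h
      · exact ⟨j, by omega, h⟩
      · omega
    · rintro ⟨j, hj, hcond⟩
      have := pvFinal_getD P Q colors hP0 j hj
      rw [← hpc, if_pos hcond] at this
      have hj' : j < pc.length := by omega
      rw [List.getD_eq_getElem _ _ hj'] at this
      exact this ▸ List.getElem_mem hj'
  -- evaluate the max over a 0/1 board
  obtain ⟨x, t, hxt⟩ : ∃ x t, pc = x :: t := by
    cases hcc : pc with
    | nil => exfalso; rw [hcc] at hlen; simp at hlen; omega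
    | cons x t => exact ⟨x, t, rfl⟩
  rw [hxt, PySem.List.max?_id_cons, Option.getD_some]
  rw [pvFoldlMax01 t x (hall x (hxt ▸ List.mem_cons_self))
      (fun y hy => hall y (hxt ▸ List.mem_cons_of_mem _ hy))]
  -- evaluate B
  have hPc : P = ((P.toNat : Nat) : Int) := (Int.toNat_of_nonneg hP0).symm
  rw [hPc, PySem.List.slice_to_natCast]
  have hB : (colors.take P.toNat).any (fun c => decide (1 ≤ c ∧ c ≤ Q)) = true ↔
      ∃ j : Nat, j < P.toNat ∧
        1 ≤ PySem.List.pyGetD colors (j : Int) 0 ∧ PySem.List.pyGetD colors (j : Int) 0 ≤ Q := by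
    rw [List.any_eq_true]
    constructor
    · rintro ⟨c, hc, hdec⟩
      rcases List.mem_iff_getElem.mp hc with ⟨j, hj, hje⟩
      rw [List.length_take] at hj
      have hjlen : j < colors.length := by omega
      rw [List.getElem_take] at hje
      refine ⟨j, by omega, ?_⟩
      rw [PySem.List.pyGetD_eq_getElem colors 0 (by omega : (0:Int) ≤ (j:Int)) (by omega)]
      simp only [Int.toNat_natCast, hje]
      exact of_decide_eq_true hdec
    · rintro ⟨j, hj, hcond⟩
      -- j < P.toNat; if Q < 1 the condition is impossible, so P.toNat ≤ colors.length
      have hjlen : j < colors.length := by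
        rcases hQlen with h | h
        · exfalso; have := hcond; omega
        · omega
      refine ⟨colors[j], ?_, ?_⟩
      · rw [List.mem_iff_getElem]
        exact ⟨j, by simp; omega, by rw [List.getElem_take]⟩
      · rw [PySem.List.pyGetD_eq_getElem colors 0 (by omega : (0:Int) ≤ (j:Int)) (by omega)] at hcond
        simpa using hcond
  by_cases hex : ∃ j : Nat, j < P.toNat ∧
      1 ≤ PySem.List.pyGetD colors (j : Int) 0 ∧ PySem.List.pyGetD colors (j : Int) 0 ≤ Q
  · rw [if_pos (hB.mpr hex)]
    have h1 : (1 : Int) ∈ pc := hone.mpr hex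
    rw [hxt, List.mem_cons] at h1
    rcases h1 with h | h
    · rw [if_pos (Or.inl h.symm)]
    · rw [if_pos (Or.inr h)]
  · rw [if_neg (fun h => hex (hB.mp h))]
    have hmem1 : (1 : Int) ∈ pc → False := fun hm => hex (hone.mp hm)
    have hc : ¬ (x = 1 ∨ 1 ∈ t) := by
      rintro (h | h)
      · exact hmem1 (by rw [hxt, h]; exact List.mem_cons_self)
      · exact hmem1 (by rw [hxt]; exact List.mem_cons_of_mem _ h)
    rw [if_neg hc]
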